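-- pv_equiv track=rewrite | github.com/flaviosoliver/project-restaurant-orders | src/analyze_log.py | not_orders
-- ===== SOURCE A (Python) =====
-- def not_orders(name, data):
--     days = set()
--     client_days = set()
--     for item in data:
--         days.add(item[2])
--     for client in data:
--         if client[0] == name:
--             client_days.add(client[2])
--     return days.difference(client_days)
-- ===== SOURCE B (Python) =====
-- def not_orders(name, data):
--     seen = {}
--     for item in data:
--         seen.setdefault(item[2], False)
--         if item[0] == name:
--             seen[item[2]] = True
--     return {day for day, ordered in seen.items() if not ordered}
-- ===== Notes on version B (the rewrite author's own statement) =====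
-- stated objective: simpler
-- what changed: Replaces the two full passes building two sets and a final set difference with a single pass that maintains one day->client-ordered? boolean dict and reads the answer off its items.
import Mathlib
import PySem

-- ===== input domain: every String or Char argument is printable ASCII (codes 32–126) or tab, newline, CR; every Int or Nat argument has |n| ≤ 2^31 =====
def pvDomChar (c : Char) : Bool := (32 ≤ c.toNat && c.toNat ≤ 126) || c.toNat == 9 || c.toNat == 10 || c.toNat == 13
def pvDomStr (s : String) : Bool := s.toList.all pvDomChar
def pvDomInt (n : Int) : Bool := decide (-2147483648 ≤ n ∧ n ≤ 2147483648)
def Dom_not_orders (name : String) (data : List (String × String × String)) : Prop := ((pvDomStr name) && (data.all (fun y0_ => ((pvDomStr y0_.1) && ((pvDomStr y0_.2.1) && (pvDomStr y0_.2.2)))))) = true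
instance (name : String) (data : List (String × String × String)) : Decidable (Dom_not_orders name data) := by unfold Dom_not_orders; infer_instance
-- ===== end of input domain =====

-- ===== PORT A =====
-- B replaces A's two-set-and-difference strategy by one pass over a day->bool dict (objective: simpler).
def not_orders (name : String) (data : List (String × String × String)) : List String :=
  let days : PySem.Set String :=
    data.foldl (fun s item => PySem.Set.add s item.2.2) PySem.Set.empty
  let client_days : PySem.Set String :=
    data.foldl (fun s client => if client.1 == name then PySem.Set.add s client.2.2 else s) PySem.Set.empty
  PySem.Set.diff days client_days

-- ===== PORT B =====
def not_orders_alt (name : String) (data : List (String × String × String)) : List String :=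
  let seen : PySem.Dict String Bool :=
    data.foldl (fun d item =>
      let d1 := if d.contains item.2.2 then d else d.insert item.2.2 false
      if item.1 == name then d1.insert item.2.2 true else d1) PySem.Dict.empty
  PySem.Set.ofList ((seen.items.filter (fun p => !p.2)).map Prod.fst)

-- ===== PRECONDITION & SPEC =====
def Spec_not_orders (name : String) (data : List (String × String × String)) (out : List String) : Prop := out = not_orders_alt name data
instance (name : String) (data : List (String × String × String)) (out : List String) : Decidable (Spec_not_orders name data out) := by unfold Spec_not_orders; infer_instance

-- ===== CLAIM (what is proved, stated in full; the proofs are below) =====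
def Claim_equal_not_orders : Prop := ∀ (name : String) (data : List (String × String × String)), Dom_not_orders name data → Spec_not_orders name data (not_orders name data)

-- ===== LEMMAS AND PROOFS =====

-- dict membership mirrors the days set under the invariant
theorem pv_dict_contains (ds cs : PySem.Set String) (d : PySem.Dict String Bool) (day : String)
    (hitems : d.items = ds.map (fun x => (x, cs.contains x))) :
    d.contains day = decide (day ∈ ds) := by
  simp [PySem.Dict.contains, hitems, List.any_map, Function.comp_def, List.any_beq']

-- overwriting an existing day with True = flipping its client_days flag
theorem pv_insert_true (ds cs : PySem.Set String) (day : String) (h : day ∈ ds)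
    (d : PySem.Dict String Bool)
    (hitems : d.items = ds.map (fun x => (x, PySem.Set.contains cs x))) :
    (d.insert day true).items
      = ds.map (fun x => (x, PySem.Set.contains (PySem.Set.add cs day) x)) := by
  have hc : d.contains day = true := by
    rw [pv_dict_contains ds cs d day hitems]; simpa using h
  simp only [PySem.Dict.insert, hc, if_true, hitems, List.map_map]
  apply List.map_congr_left
  intro x hx
  by_cases hxd : x = day
  · subst hxd; simp [PySem.Set.contains, PySem.Set.mem_add]
  · simp [hxd, PySem.Set.contains, PySem.Set.mem_add]

-- Loop invariant: after any prefix, the dict's items are exactly the days set paired with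
-- the client_days membership flag, and client_days only holds days already seen.
theorem pv_inv (name : String) (data : List (String × String × String))
    (ds cs : PySem.Set String) (d : PySem.Dict String Bool)
    (hitems : d.items = ds.map (fun x => (x, cs.contains x)))
    (hsub : ∀ x, x ∈ cs → x ∈ ds) :
    (data.foldl (fun d item =>
      let d1 := if d.contains item.2.2 then d else d.insert item.2.2 false
      if item.1 == name then d1.insert item.2.2 true else d1) d).items
      = (data.foldl (fun s item => PySem.Set.add s item.2.2) ds).map
          (fun x => (x, (data.foldl (fun s client => if client.1 == name then PySem.Set.add s client.2.2 else s) cs).contains x)) ∧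
    (∀ x, x ∈ (data.foldl (fun s client => if client.1 == name then PySem.Set.add s client.2.2 else s) cs) →
      x ∈ (data.foldl (fun s item => PySem.Set.add s item.2.2) ds)) := by
  induction data generalizing ds cs d with
  | nil => exact ⟨hitems, hsub⟩
  | cons hd rest ih =>
    obtain ⟨n, m, day⟩ := hd
    simp only [List.foldl_cons]
    by_cases hmem : day ∈ ds
    · -- the day was seen before: both the days set and the dict keys are unchanged
      have hc : d.contains day = true := by
        rw [pv_dict_contains ds cs d day hitems]; simpa using hmem
      have hadd : PySem.Set.add ds day = ds := by
        simp [PySem.Set.add, PySem.Set.contains, hmem]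
      by_cases hn : (n == name) = true
      · simp only [hc, if_true, hn, hadd]
        exact ih ds (PySem.Set.add cs day) (d.insert day true)
          (pv_insert_true ds cs day hmem d hitems)
          (by intro x hx
              rcases (PySem.Set.mem_add cs day x).mp hx with h | h
              · exact hsub x h
              · subst h; exact hmem)
      · simp only [hc, if_true, hn, hadd]
        exact ih ds cs d hitems hsub
    · -- a new day: it is appended to the days set and to the dict, flag = (n == name)
      have hc : d.contains day = false := by
        rw [pv_dict_contains ds cs d day hitems]; simpa using hmem
      have hcs : day ∉ cs := fun h => hmem (hsub day h)
      have hadd : PySem.Set.add ds day = ds ++ [day] := by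
        simp [PySem.Set.add, PySem.Set.contains, hmem]
      have h1 : (d.insert day false).items = d.items ++ [(day, false)] := by
        simp [PySem.Dict.insert, hc]
      by_cases hn : (n == name) = true
      · have hc1 : (d.insert day false).contains day = true := by
          simp [PySem.Dict.contains, h1]
        have hitems2 : ((d.insert day false).insert day true).items
            = (PySem.Set.add ds day).map (fun x => (x, (PySem.Set.add cs day).contains x)) := by
          conv_lhs => rw [PySem.Dict.insert, if_pos hc1]
          dsimp only
          rw [h1, hitems, hadd, List.map_append, List.map_append, List.map_map]
          refine congrArg₂ (· ++ ·) ?_ ?_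
          · apply List.map_congr_left
            intro x hx
            have hxd : x ≠ day := fun h => hmem (h ▸ hx)
            simp [hxd, PySem.Set.contains, PySem.Set.mem_add]
          · simp [PySem.Set.contains, PySem.Set.mem_add]
        have hsub2 : ∀ x, x ∈ PySem.Set.add cs day → x ∈ PySem.Set.add ds day := by
          intro x hx
          rcases (PySem.Set.mem_add cs day x).mp hx with h | h
          · exact (PySem.Set.mem_add ds day x).mpr (Or.inl (hsub x h))
          · exact (PySem.Set.mem_add ds day x).mpr (Or.inr h)
        simp only [hc, hn, if_true]
        exact ih (PySem.Set.add ds day) (PySem.Set.add cs day) ((d.insert day false).insert day true) hitems2 hsub2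
      · simp only [hc, hn]
        refine ih (PySem.Set.add ds day) cs (d.insert day false) ?_ ?_
        · rw [h1, hitems, hadd, List.map_append]
          simp [PySem.Set.contains, hcs]
        · intro x hx
          exact (PySem.Set.mem_add ds day x).mpr (Or.inl (hsub x hx))

-- ===== VERDICT (by name: the statement is the Claim_ definition above) =====
theorem not_orders_spec : Claim_equal_not_orders := by
  intro name data _
  unfold Spec_not_orders not_orders not_orders_alt
  dsimp only
  obtain ⟨hI, -⟩ := pv_inv name data PySem.Set.empty PySem.Set.empty PySem.Dict.empty rfl (by intro x h; cases h)
  rw [hI, List.filter_map, List.map_map]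
  have hfst : (Prod.fst ∘ fun x => (x, (data.foldl (fun s client => if client.1 == name then PySem.Set.add s client.2.2 else s) PySem.Set.empty).contains x)) = id := rfl
  rw [hfst, List.map_id]
  have hnd : (data.foldl (fun s item => PySem.Set.add s item.2.2) PySem.Set.empty).Nodup := by
    have h2 : (data.map (fun item => item.2.2)).foldl PySem.Set.add PySem.Set.empty
        = data.foldl (fun s item => PySem.Set.add s item.2.2) PySem.Set.empty := List.foldl_map
    rw [← h2]
    exact PySem.Set.nodup_ofList _
  rw [PySem.Set.ofList_eq_self_of_nodup _ (hnd.filter _)]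
  rfl
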